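-- pv_equiv track=rewrite | github.com/LPELCRACK896/DDL_labF | YALEX.py | __head_extractor
-- ===== SOURCE A (Python) =====
-- def __head_extractor(contenido):
--     i = 0
--     end_comment = False
--     start_comment = False
--     contenido_header = ""
--     while not end_comment and i<len(contenido):
--         linea  = contenido[i]
--         j = 0
--         while not end_comment and  j<len(linea):
--             char = linea[j]
--             if char == "{" :
--                 start_comment = True
--             elif char!='}':
--                 if start_comment: contenido_header += char
--             else:
--                 end_comment = True
--             j += 1
--         contenido_header += "\n"
--         i += 1
--     return contenido_header.rstrip(), 0, i
-- ===== SOURCE B (Python) =====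
-- def __head_extractor(contenido):
--     parts = []
--     started = False
--     ended = False
--     i = 0
--     for linea in contenido:
--         if ended:
--             break
--         i += 1
--         if started:
--             e = linea.find("}")
--             if e == -1:
--                 seg = linea
--             else:
--                 ended = True
--                 seg = linea[:e]
--         else:
--             b = linea.find("{")
--             e = linea.find("}")
--             if e != -1 and (b == -1 or e < b):
--                 ended = True
--                 seg = ""
--             elif b == -1:
--                 seg = ""
--             else:
--                 started = True
--                 rest = linea[b + 1:]
--                 e2 = rest.find("}")
--                 if e2 == -1:
--                     seg = rest
--                 else:
--                     ended = True
--                     seg = rest[:e2]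
--         parts.append(seg.replace("{", "") + "\n")
--     return "".join(parts).rstrip(), 0, i
-- ===== Notes on version B (the rewrite author's own statement) =====
-- stated objective: simpler
-- what changed: Replaces the char-by-char state machine (nested while loops over every character with start/end flags and per-character string concatenation) by a per-line decomposition using str.find and slicing: each line contributes one slice (after the first '{', up to the first '}'), with stray '{' removed by replace.
import Mathlib
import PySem

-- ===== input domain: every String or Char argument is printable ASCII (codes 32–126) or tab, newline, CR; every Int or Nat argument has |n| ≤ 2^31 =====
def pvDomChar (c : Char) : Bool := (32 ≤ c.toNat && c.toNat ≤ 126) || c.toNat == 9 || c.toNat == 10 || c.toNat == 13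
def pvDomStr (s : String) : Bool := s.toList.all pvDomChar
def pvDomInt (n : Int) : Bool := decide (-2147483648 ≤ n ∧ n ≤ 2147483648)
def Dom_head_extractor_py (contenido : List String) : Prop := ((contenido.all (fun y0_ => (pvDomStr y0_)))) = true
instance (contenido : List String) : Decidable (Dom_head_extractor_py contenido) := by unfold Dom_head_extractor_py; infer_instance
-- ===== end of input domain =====

-- B replaces A's char-by-char nested-while state machine by a per-line find/slice/replace
-- decomposition (objective: simpler); return values are proved equal on all inputs.


-- ===== PORT A =====
-- inner while over the characters of one line; state: (contenido_header, start_comment, end_comment)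
def pvA_inner : List Char → Bool → List Char → (List Char × Bool × Bool)
  | [], st, acc => (acc, st, false)
  | c :: cs, st, acc =>
      if c = '{' then pvA_inner cs true acc
      else if c ≠ '}' then pvA_inner cs st (if st then acc ++ [c] else acc)
      else (acc, st, true)

-- outer while over the lines; stops when end_comment; appends '\n' and bumps i per processed line
def pvA_outer : List String → Bool → List Char → Int → (List Char × Int)
  | [], _, acc, i => (acc, i)
  | l :: ls, st, acc, i =>
      match pvA_inner l.toList st acc with
      | (acc', st', ended) =>
        if ended then (acc' ++ ['\n'], i + 1)
        else pvA_outer ls st' (acc' ++ ['\n']) (i + 1)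

def head_extractor_py (contenido : List String) : String × Int × Int :=
  match pvA_outer contenido false [] 0 with
  | (acc, i) => (String.ofList (PySem.Chars.rstrip acc), 0, i)

-- ===== PORT B =====
-- one line: (segment collected, started', ended)
def pvB_line (started : Bool) (line : List Char) : (List Char × Bool × Bool) :=
  if started then
    let e := PySem.Chars.find line ['}']
    if e = -1 then (line, true, false)
    else (PySem.Chars.slice line none (some e), true, true)
  else
    let b := PySem.Chars.find line ['{']
    let e := PySem.Chars.find line ['}']
    if e ≠ -1 ∧ (b = -1 ∨ e < b) then ([], false, true)
    else if b = -1 then ([], false, false)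
    else
      let rest := PySem.Chars.slice line (some (b + 1)) none
      let e2 := PySem.Chars.find rest ['}']
      if e2 = -1 then (rest, true, false)
      else (PySem.Chars.slice rest none (some e2), true, true)

-- the for-loop with break: collects parts and counts processed lines
def pvB_loop : List String → Bool → (List (List Char) × Int)
  | [], _ => ([], 0)
  | l :: ls, st =>
      match pvB_line st l.toList with
      | (seg, st', ended) =>
        let part := PySem.Chars.replace seg ['{'] [] ++ ['\n']
        if ended then ([part], 1)
        else
          match pvB_loop ls st' with
          | (ps, n) => (part :: ps, n + 1)

def head_extractor_py_alt (contenido : List String) : String × Int × Int :=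
  match pvB_loop contenido false with
  | (ps, n) => (String.ofList (PySem.Chars.rstrip (PySem.Chars.join [] ps)), 0, n)

-- ===== PRECONDITION & SPEC =====
def Spec_head_extractor_py (contenido : List String) (out : String × Int × Int) : Prop := out = head_extractor_py_alt contenido
instance (contenido : List String) (out : String × Int × Int) : Decidable (Spec_head_extractor_py contenido out) := by unfold Spec_head_extractor_py; infer_instance

-- ===== CLAIM (what is proved, stated in full; the proofs are below) =====
def Claim_equal_head_extractor_py : Prop := ∀ (contenido : List String), Dom_head_extractor_py contenido → Spec_head_extractor_py contenido (head_extractor_py contenido)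

-- ===== LEMMAS AND PROOFS =====

theorem pv_find_go_cases (sub : List Char) : ∀ (cs : List Char) (k : Nat),
    (PySem.Chars.find.go sub cs k = -1 ∧ PySem.Chars.find.go sub cs 0 = -1) ∨
      ∃ n : Nat, PySem.Chars.find.go sub cs 0 = (n : Int) ∧
        PySem.Chars.find.go sub cs k = (n : Int) + k := by
  intro cs
  induction cs with
  | nil =>
      intro k
      rw [PySem.Chars.find.go, PySem.Chars.find.go]
      by_cases he : sub.isEmpty = true
      · right; exact ⟨0, by simp [he]⟩
      · left; simp [he]
  | cons c t ih =>
      intro k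
      rw [PySem.Chars.find.go, PySem.Chars.find.go]
      by_cases hp : sub.isPrefixOf (c :: t) = true
      · right; exact ⟨0, by simp [hp]⟩
      · simp only [hp, Bool.false_eq_true, if_false]
        rcases ih (k + 1) with ⟨h1, h0⟩ | ⟨n, h0, h1⟩
        · rcases ih 1 with ⟨h1', _⟩ | ⟨n, h0', h1'⟩
          · left; exact ⟨h1, h1'⟩
          · exfalso; rw [h0'] at h0; omega
        · rcases ih 1 with ⟨h1', h0'⟩ | ⟨m, h0', h1'⟩
          · exfalso; rw [h0'] at h0; omega
          · right
            refine ⟨n + 1, ?_, ?_⟩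
            · rw [h1']; rw [h0'] at h0; push_cast; omega
            · rw [h1]; rw [h0'] at h0; push_cast; omega

theorem pv_find_go_shift (sub : List Char) (cs : List Char) (k : Nat) :
    PySem.Chars.find.go sub cs k =
      if PySem.Chars.find.go sub cs 0 = -1 then -1 else PySem.Chars.find.go sub cs 0 + k := by
  rcases pv_find_go_cases sub cs k with ⟨h1, h0⟩ | ⟨n, h0, h1⟩
  · simp [h1, h0]
  · rw [h0, h1]; simp

theorem pv_find_cons (x c : Char) (cs : List Char) :
    PySem.Chars.find (c :: cs) [x] =
      if c = x then 0
      else if PySem.Chars.find cs [x] = -1 then -1 else PySem.Chars.find cs [x] + 1 := by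
  rw [PySem.Chars.find, PySem.Chars.find.go]
  have hpref : ([x].isPrefixOf (c :: cs)) = (x == c) := by
    simp [List.isPrefixOf]
  by_cases hc : c = x
  · subst hc; simp [hpref]
  · have : (x == c) = false := by simp [beq_iff_eq]; exact fun h => hc h.symm
    simp [hpref, this, hc]
    rw [pv_find_go_shift [x] cs 1]
    rw [PySem.Chars.find]
    split <;> simp

theorem pv_find_nonneg_or (x : Char) (cs : List Char) :
    PySem.Chars.find cs [x] = -1 ∨ ∃ n : Nat, PySem.Chars.find cs [x] = n := by
  induction cs with
  | nil => left; simp [PySem.Chars.find, PySem.Chars.find.go]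
  | cons c t ih =>
      rw [pv_find_cons]
      by_cases hc : c = x
      · right; exact ⟨0, by simp [hc]⟩
      · simp [hc]
        rcases ih with h | ⟨n, h⟩
        · left; simp [h]
        · right; exact ⟨n + 1, by simp [h]⟩

theorem pv_replace_go_filter : ∀ (fuel : Nat) (l acc : List Char), l.length ≤ fuel →
    PySem.Chars.replace.go ['{'] [] fuel l acc = acc.reverse ++ l.filter (fun c => c ≠ '{') := by
  intro fuel
  induction fuel with
  | zero =>
      intro l acc h
      have : l = [] := List.eq_nil_of_length_eq_zero (Nat.le_zero.mp h)
      subst this; simp [PySem.Chars.replace.go]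
  | succ f ih =>
      intro l acc h
      cases l with
      | nil => simp [PySem.Chars.replace.go]
      | cons c t =>
          rw [PySem.Chars.replace.go]
          by_cases hc : c = '{'
          · subst hc
            simp [List.isPrefixOf]
            rw [ih t acc (by simpa using Nat.lt_succ_iff.mp (by simpa using h))]
            simp
          · have hp : (['{'].isPrefixOf (c :: t)) = false := by
              simp [List.isPrefixOf, beq_iff_eq]; exact fun h' => hc h'.symm
            simp [hp]
            rw [ih t (c :: acc) (by simpa using Nat.lt_succ_iff.mp (by simpa using h))]
            simp [hc]

theorem pv_replace_filter (cs : List Char) :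
    PySem.Chars.replace cs ['{'] [] = cs.filter (fun c => c ≠ '{') := by
  rw [PySem.Chars.replace]
  simp [pv_replace_go_filter cs.length cs [] (le_refl _)]

theorem pv_join_nil_cons (p : List Char) (ps : List (List Char)) :
    PySem.Chars.join [] (p :: ps) = p ++ PySem.Chars.join [] ps := by
  simp [PySem.Chars.join, List.intercalate]
  cases ps with
  | nil => simp
  | cons q qs => simp [List.intersperse]

theorem pv_inner_eq : ∀ (cs : List Char) (st : Bool) (acc : List Char),
    pvA_inner cs st acc =
      (acc ++ (pvB_line st cs).1.filter (fun c => c ≠ '{'), (pvB_line st cs).2.1, (pvB_line st cs).2.2) := by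
  intro cs
  induction cs with
  | nil =>
      intro st acc
      cases st <;> simp [pvA_inner, pvB_line, PySem.Chars.find, PySem.Chars.find.go]
  | cons c t ih =>
      intro st acc
      cases st with
      | true =>
          by_cases hc : c = '}'
          · subst hc
            simp [pvA_inner, pvB_line, pv_find_cons]
            simp [PySem.List.slice]
          · by_cases hb : c = '{'
            · subst hb
              rw [pvA_inner]; simp
              rw [ih true acc]
              rcases pv_find_nonneg_or '}' t with h | ⟨n, h⟩
              · simp [pvB_line, pv_find_cons, h]
              · have hne : PySem.Chars.find t ['}'] ≠ -1 := by rw [h]; omega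
                have hne1 : ¬ ((n : Int) + 1 = -1) := by omega
                have hsl : ∀ (x : Char), PySem.List.slice (x :: t) none (some ((n : Int) + 1)) = x :: List.take n t := by
                  intro x
                  rw [PySem.List.slice_to _ (by omega)]
                  have h2 : ((n : Int) + 1).toNat = n + 1 := by omega
                  simp [h2]
                simp [pvB_line, pv_find_cons, h, hne, hne1, hsl]
            · rw [pvA_inner]; simp [hb, hc]
              rw [ih true (acc ++ [c])]
              rcases pv_find_nonneg_or '}' t with h | ⟨n, h⟩
              · simp [pvB_line, pv_find_cons, h, hc, hb]
              · have hne : PySem.Chars.find t ['}'] ≠ -1 := by rw [h]; omega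
                have hne1 : ¬ ((n : Int) + 1 = -1) := by omega
                have hsl : ∀ (x : Char), PySem.List.slice (x :: t) none (some ((n : Int) + 1)) = x :: List.take n t := by
                  intro x
                  rw [PySem.List.slice_to _ (by omega)]
                  have h2 : ((n : Int) + 1).toNat = n + 1 := by omega
                  simp [h2]
                simp [pvB_line, pv_find_cons, h, hne, hc, hb, hne1, hsl]
      | false =>
          by_cases hc : c = '}'
          · subst hc
            rw [pvA_inner]; simp
            have he : PySem.Chars.find ('}' :: t) ['}'] = 0 := by rw [pv_find_cons]; simp
            have hbcases : PySem.Chars.find ('}' :: t) ['{'] = -1 ∨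
                ∃ n : Nat, PySem.Chars.find ('}' :: t) ['{'] = (n : Int) + 1 := by
              rw [pv_find_cons]; simp
              rcases pv_find_nonneg_or '{' t with h | ⟨n, h⟩
              · left; simp [h]
              · right; exact ⟨n, by simp [h]⟩
            rcases hbcases with h | ⟨n, h⟩
            · simp [pvB_line, he, h]
            · have hlt : (0 : Int) < (n : Int) + 1 := by omega
              simp [pvB_line, he, h, hlt]
          · by_cases hb : c = '{'
            · subst hb
              rw [pvA_inner]; simp
              rw [ih true acc]
              have hbf : PySem.Chars.find ('{' :: t) ['{'] = 0 := by rw [pv_find_cons]; simp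
              have hrest : PySem.List.slice ('{' :: t) (some (1 : Int)) none = t := by
                rw [PySem.List.slice_from _ (by omega)]
                simp
              have hEq : pvB_line false ('{' :: t) = pvB_line true t := by
                rcases pv_find_nonneg_or '}' t with hE | ⟨ne, hE⟩
                · have he : PySem.Chars.find ('{' :: t) ['}'] = -1 := by
                    rw [pv_find_cons]; simp [hE]
                  simp [pvB_line, hbf, he, hE, hrest]
                · have hne : PySem.Chars.find t ['}'] ≠ -1 := by rw [hE]; omega
                  have he : PySem.Chars.find ('{' :: t) ['}'] = (ne : Int) + 1 := by
                    rw [pv_find_cons]; simp [hE, hne]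
                  have hx : ¬ ((ne : Int) + 1 = -1) := by omega
                  have hy : ¬ ((ne : Int) + 1 < 0) := by omega
                  simp [pvB_line, hbf, he, hE, hrest, hne, hx, hy]
              rw [hEq]
              simp
            · rw [pvA_inner]; simp [hb, hc]
              rw [ih false acc]
              have hEq : pvB_line false (c :: t) = pvB_line false t := by
                have hbf : PySem.Chars.find (c :: t) ['{'] =
                    (if PySem.Chars.find t ['{'] = -1 then -1 else PySem.Chars.find t ['{'] + 1) := by
                  rw [pv_find_cons]; simp [hb]
                have hef : PySem.Chars.find (c :: t) ['}'] =
                    (if PySem.Chars.find t ['}'] = -1 then -1 else PySem.Chars.find t ['}'] + 1) := by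
                  rw [pv_find_cons]; simp [hc]
                rcases pv_find_nonneg_or '{' t with hB | ⟨nb, hB⟩ <;>
                  rcases pv_find_nonneg_or '}' t with hE | ⟨ne, hE⟩
                · simp [pvB_line, hbf, hef, hB, hE]
                · have hne2 : ¬ ((ne : Int) + 1 = -1) := by omega
                  simp [pvB_line, hbf, hef, hB, hE, hne2]
                · have hne1 : PySem.Chars.find t ['{'] ≠ -1 := by rw [hB]; omega
                  have hx : ¬ ((nb : Int) + 1 = -1) := by omega
                  have hr1 : PySem.List.slice (c :: t) (some ((nb : Int) + 1 + 1)) none =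
                      PySem.List.slice t (some ((nb : Int) + 1)) none := by
                    rw [PySem.List.slice_from _ (by omega), PySem.List.slice_from _ (by omega)]
                    have h1 : ((nb : Int) + 1 + 1).toNat = nb + 2 := by omega
                    have h2 : ((nb : Int) + 1).toNat = nb + 1 := by omega
                    simp [h1, h2]
                  simp [pvB_line, hbf, hef, hB, hE, hne1, hx, hr1]
                · have hne1 : PySem.Chars.find t ['{'] ≠ -1 := by rw [hB]; omega
                  have hne2 : PySem.Chars.find t ['}'] ≠ -1 := by rw [hE]; omega
                  have hx : ¬ ((nb : Int) + 1 = -1) := by omega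
                  have hy : ¬ ((ne : Int) + 1 = -1) := by omega
                  have hr1 : PySem.List.slice (c :: t) (some ((nb : Int) + 1 + 1)) none =
                      PySem.List.slice t (some ((nb : Int) + 1)) none := by
                    rw [PySem.List.slice_from _ (by omega), PySem.List.slice_from _ (by omega)]
                    have h1 : ((nb : Int) + 1 + 1).toNat = nb + 2 := by omega
                    have h2 : ((nb : Int) + 1).toNat = nb + 1 := by omega
                    simp [h1, h2]
                  by_cases hlt : (ne : Int) < nb
                  · have hlt' : (ne : Int) + 1 < (nb : Int) + 1 := by omega
                    simp [pvB_line, hbf, hef, hB, hE, hne1, hne2, hx, hy, hlt, hlt']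
                  · have hlt' : ¬ ((ne : Int) + 1 < (nb : Int) + 1) := by omega
                    simp [pvB_line, hbf, hef, hB, hE, hne1, hne2, hx, hy, hlt, hlt', hr1]
              rw [hEq]
              simp

theorem pv_outer_eq : ∀ (ls : List String) (st : Bool) (acc : List Char) (i : Int),
    pvA_outer ls st acc i =
      (acc ++ PySem.Chars.join [] (pvB_loop ls st).1, i + (pvB_loop ls st).2) := by
  intro ls
  induction ls with
  | nil => intro st acc i; simp [pvA_outer, pvB_loop, PySem.Chars.join, List.intercalate]
  | cons l t ih =>
      intro st acc i
      rw [pvA_outer, pv_inner_eq]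
      rcases h : pvB_line st l.toList with ⟨seg, st', ended⟩
      rw [pvB_loop]
      cases ended with
      | true =>
          simp [h, pv_replace_filter, pv_join_nil_cons, PySem.Chars.join, List.intercalate]
      | false =>
          simp only [h, Bool.false_eq_true, if_false]
          rw [ih st' (acc ++ List.filter (fun c => c ≠ '{') seg ++ ['\n']) (i + 1)]
          rcases h2 : pvB_loop t st' with ⟨ps, n⟩
          simp [h2, pv_replace_filter, pv_join_nil_cons]
          omega

-- ===== VERDICT (by name: the statement is the Claim_ definition above) =====
theorem head_extractor_py_spec : Claim_equal_head_extractor_py := by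
  intro contenido _
  unfold Spec_head_extractor_py head_extractor_py head_extractor_py_alt
  rw [pv_outer_eq]
  rcases h : pvB_loop contenido false with ⟨ps, n⟩
  simp [h]
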